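-- pv_equiv track=rewrite | github.com/VascoMS/Projeto2FP | Projeto2.py | obter_posicoes_adjacentes
-- ===== SOURCE A (Python) =====
-- def cria_posicao(c, l):
--     """ Funcao de operacao basica para criar uma posicao. Foi escolhida a representacao na forma de lista.
--
--     :param c: (str) coluna do tabuleiro representada pelos valores em valores_possiveis_c
--     :param l: (str) linha do tabuleiro representada pelos valores em valores_possiveis_1
--     :return:  (list) lista com o primeiro termo a representar o valor da coluna e o segundo a representar o da linha
--     """
--     valores_possiveis_l = ('1', '2', '3')
--     valores_possiveis_c = ('a', 'b', 'c')
--     if l not in valores_possiveis_l or c not in valores_possiveis_c: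
--         raise ValueError('cria_posicao: argumentos invalidos')
--     return [c, l]
--
-- def obter_pos_c(p):
--     """ Funcao de operacao basica para obter a coluna da posicao passada como argumento.
--
--     :param p: (list) posicao com a representacao escolhida neste caso uma lista
--     :return: (str) coluna da posicao
--     """
--     return p[0]
--
-- def obter_pos_l(p):
--     """ Funcao de operacao basica para obter a linha da posicao passada como argumento.
--
--     :param p: (list) posicao com a representacao escolhida neste caso uma lista
--     :return: (str) linha da posicao
--     """
--
--     return p[1]
--
-- def obter_posicoes_adjacentes(p):
--     """ Funcao de alto nivel que permite obter as posicoes adjacentes num tabuleiro de jogo do moinho da posicao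
--         especificada.
--
--     :param p:  posicao com qualquer representacao
--     :return: (tuple) tuplo com as posicoes adjacentes
--     """
--     valores_posiveis_c = ('a', 'b', 'c')
--     valores_posiveis_l = ('1', '2', '3')
--     pos_possiveis = [cria_posicao(c, l) for l in valores_posiveis_l for c in valores_posiveis_c]
--     res_validos = ((1, 0), (0, 1), (-1, 0), (0, -1))  # as posicoes adjacentes a uma posicao podem ser obtidas
--     res_validos_diag = ((1, 1), (-1, -1), (1, -1), (-1, 1))
--     valores_com_diag = (cria_posicao('a', '1'), cria_posicao('c', '1'), cria_posicao('a', '3'), cria_posicao('c', '3'),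
--                         cria_posicao('b', '2'))
--     # subtraindo o ord da coluna e o valor da linha a posicao argumento, se a posicao for adjacente obtemos um dos
--     # resultados do tuplo res_validos ou res_validos_diag visto que as posicoes adjacentes se encontram um valor para a
--     # direita, para esquerda, para cima ou para baixo ou mesmo uma combinacao de dois membros deste conjunto dependendo
--     # da posicao no tabuleiro
--     return tuple(i for i in pos_possiveis if ((ord(obter_pos_c(p)) - ord(obter_pos_c(i)), int(obter_pos_l(p)) -
--                                                int(obter_pos_l(i))) in res_validos) or (i in valores_com_diag and
--                                                                                         (ord(obter_pos_c(p)) - ord(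
--                                                                                             obter_pos_c(i)),
--                                                                                          int(obter_pos_l(p))
--                                                                                          - int(obter_pos_l(
--                                                                                              i))) in res_validos_diag))
-- ===== SOURCE B (Python) =====
-- def obter_posicoes_adjacentes(p):
--     """Adjacent mill-board positions, computed directly from the coordinates of p
--     instead of scanning all nine board cells with a predicate."""
--     x = ord(p[0])
--     y = int(p[1])
--     res = []
--     for dy in (-1, 0, 1):
--         for dx in (-1, 0, 1):
--             if dx == 0 and dy == 0:
--                 continue
--             cx, cy = x + dx, y + dy
--             if 97 <= cx <= 99 and 1 <= cy <= 3 and (dx == 0 or dy == 0 or (cx + cy) % 2 == 0):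
--                 res.append([chr(cx), str(cy)])
--     return tuple(res)
-- ===== Notes on version B (the rewrite author's own statement) =====
-- stated objective: simpler
-- what changed: Instead of building all nine board cells with cria_posicao and filtering them with a membership-in-offset-tuples predicate, B walks the eight neighbouring offsets of p's own coordinates, keeps those that land on the board, and admits diagonal offsets exactly when the target cell's coordinate parity is even (corners and centre), emitting neighbours directly in board order.
import Mathlib
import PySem

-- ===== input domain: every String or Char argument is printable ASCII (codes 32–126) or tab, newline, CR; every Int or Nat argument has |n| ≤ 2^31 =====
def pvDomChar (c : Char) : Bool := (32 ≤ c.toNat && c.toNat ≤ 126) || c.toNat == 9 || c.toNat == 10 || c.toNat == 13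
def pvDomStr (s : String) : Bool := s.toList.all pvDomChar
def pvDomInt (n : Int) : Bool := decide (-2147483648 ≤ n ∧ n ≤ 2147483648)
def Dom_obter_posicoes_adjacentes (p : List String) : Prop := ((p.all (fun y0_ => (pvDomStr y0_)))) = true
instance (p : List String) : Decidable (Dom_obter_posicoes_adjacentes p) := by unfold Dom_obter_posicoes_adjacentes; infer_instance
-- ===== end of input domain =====

-- B replaces A's filter-all-nine-board-cells-by-offset-membership scan with a direct walk over
-- the eight neighbouring offsets of p's own coordinates (objective: simpler).

-- ===== PORT A =====
-- cria_posicao raises ValueError on an off-board pair → Option; in A it is only ever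
-- called on the nine literal on-board pairs, where it always returns some [c, l].
def cria_posicao (c l : String) : Option (List String) :=
  if l ∉ ["1", "2", "3"] ∨ c ∉ ["a", "b", "c"] then none else some [c, l]

def obter_pos_c (p : List String) : Option String := PySem.List.pyGet? p 0

def obter_pos_l (p : List String) : Option String := PySem.List.pyGet? p 1

-- the generator's condition for one candidate cell i, given x = ord(p[0]) and y = int(p[1]);
-- the .getD defaults are unreachable: A only feeds in the nine board cells [c, l]
-- (c a single letter, l a digit), where ord and int always succeed
def adjCondA (x y : Int) (i : List String) : Bool :=
  let ic : Int := ((obter_pos_c i).getD "").toList.headI.toNat   -- ord(obter_pos_c(i))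
  let il : Int := (PySem.Int.ofStr? ((obter_pos_l i).getD "")).getD 0   -- int(obter_pos_l(i))
  decide ((x - ic, y - il) ∈ [((1 : Int), (0 : Int)), (0, 1), (-1, 0), (0, -1)]) ||
    (decide (i ∈ ([(cria_posicao "a" "1").getD [], (cria_posicao "c" "1").getD [],
                   (cria_posicao "a" "3").getD [], (cria_posicao "c" "3").getD [],
                   (cria_posicao "b" "2").getD []] : List (List String))) &&
     decide ((x - ic, y - il) ∈ [((1 : Int), (1 : Int)), (-1, -1), (1, -1), (-1, 1)]))

-- the filtered scan over pos_possiveis, with x = ord(p[0]) and y = int(p[1]) already extracted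
def adjScanA (x y : Int) : List (List String) :=
  (["1", "2", "3"].flatMap fun l => ["a", "b", "c"].filterMap fun c => cria_posicao c l).filter
    (adjCondA x y)

-- ord(p[0]) needs p[0] to exist and be a single character (else TypeError); int(p[1]) needs
-- p[1] to exist and parse (IndexError / ValueError); each 'none' is exactly a Python raise
-- (outside Pre_), where the port returns [].
-- ord(s) succeeds exactly on a single-character string (else TypeError)
def ordArgA (cs : List Char) : Option Char :=
  match cs with
  | [c] => some c
  | _ => none

def obter_posicoes_adjacentes (p : List String) : List (List String) :=
  (((obter_pos_c p).bind fun pc =>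
      (ordArgA pc.toList).bind fun cch =>
        (obter_pos_l p).bind fun pl =>
          (PySem.Int.ofStr? pl).map fun y => adjScanA (cch.toNat : Int) y) :
    Option (List (List String))).getD []

-- ===== PORT B =====
-- the double offset loop of Source B, with x = ord(p[0]) and y = int(p[1]) already extracted
def adjLoopB (x y : Int) : List (List String) :=
  [(-1 : Int), 0, 1].foldl
    (fun res dy =>
      [(-1 : Int), 0, 1].foldl
        (fun res dx =>
          if dx = 0 ∧ dy = 0 then res
          else
            let cx := x + dx
            let cy := y + dy
            if 97 ≤ cx ∧ cx ≤ 99 ∧ 1 ≤ cy ∧ cy ≤ 3 ∧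
                (dx = 0 ∨ dy = 0 ∨ PySem.Int.mod (cx + cy) 2 = 0) then
              res ++ [[String.ofList [Char.ofNat cx.toNat], PySem.Int.toStr cy]]
            else res)
        res)
    []

-- Source B evaluates ord(p[0]) first, then int(p[1]), exactly like the chain below
-- ord(s) succeeds exactly on a single-character string (else TypeError)
def ordArgB (cs : List Char) : Option Char :=
  match cs with
  | [c] => some c
  | _ => none

def obter_posicoes_adjacentes_alt (p : List String) : List (List String) :=
  (((PySem.List.pyGet? p 0).bind fun pc =>
      (ordArgB pc.toList).bind fun cch =>
        (PySem.List.pyGet? p 1).bind fun pl =>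
          (PySem.Int.ofStr? pl).map fun y => adjLoopB (cch.toNat : Int) y) :
    Option (List (List String))).getD []

-- ===== PRECONDITION & SPEC =====
-- Pre_ is exactly where the Python A returns: p has at least two items, p[0] is a single
-- character (else ord raises TypeError) and p[1] parses as an int (else ValueError).
def Pre_obter_posicoes_adjacentes (p : List String) : Prop :=
  2 ≤ p.length ∧ (p.getD 0 "").toList.length = 1 ∧
    (PySem.Int.ofStr? (p.getD 1 "")).isSome = true
instance (p : List String) : Decidable (Pre_obter_posicoes_adjacentes p) := by
  unfold Pre_obter_posicoes_adjacentes; infer_instance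

def pvWitness_obter_posicoes_adjacentes : List String := ["b", "2"]

def Spec_obter_posicoes_adjacentes (p : List String) (out : List (List String)) : Prop :=
  out = obter_posicoes_adjacentes_alt p
instance (p : List String) (out : List (List String)) :
    Decidable (Spec_obter_posicoes_adjacentes p out) := by
  unfold Spec_obter_posicoes_adjacentes; infer_instance

-- ===== CLAIM (what is proved, stated in full; the proofs are below) =====
def Claim_equal_obter_posicoes_adjacentes : Prop :=
  ∀ (p : List String), Dom_obter_posicoes_adjacentes p → Pre_obter_posicoes_adjacentes p →
    Spec_obter_posicoes_adjacentes p (obter_posicoes_adjacentes p)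

-- ===== LEMMAS AND PROOFS =====

-- off the 5×5 coordinate box around the board, A's scan keeps nothing
lemma adjScanA_far (x y : Int) (h : ¬(96 ≤ x ∧ x ≤ 100) ∨ ¬(0 ≤ y ∧ y ≤ 4)) :
    adjScanA x y = [] := by
  simp only [adjScanA, List.filter_eq_nil_iff]
  intro i hi
  fin_cases hi <;>
    simp [adjCondA, cria_posicao, obter_pos_c, obter_pos_l, PySem.List.pyGet?,
      PySem.List.pyIdx?, Prod.mk.injEq,
      show PySem.Int.ofStr? "1" = some 1 from by decide,
      show PySem.Int.ofStr? "2" = some 2 from by decide,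
      show PySem.Int.ofStr? "3" = some 3 from by decide] <;> omega

-- off the same box, every guard of B's offset loop is false
lemma adjLoopB_far (x y : Int) (h : ¬(96 ≤ x ∧ x ≤ 100) ∨ ¬(0 ≤ y ∧ y ≤ 4)) :
    adjLoopB x y = [] := by
  have inner : ∀ (res : List (List String)) (dy : Int), dy = -1 ∨ dy = 0 ∨ dy = 1 →
      List.foldl
        (fun res dx =>
          if dx = 0 ∧ dy = 0 then res
          else
            let cx := x + dx
            let cy := y + dy
            if 97 ≤ cx ∧ cx ≤ 99 ∧ 1 ≤ cy ∧ cy ≤ 3 ∧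
                (dx = 0 ∨ dy = 0 ∨ PySem.Int.mod (cx + cy) 2 = 0) then
              res ++ [[String.ofList [Char.ofNat cx.toNat], PySem.Int.toStr cy]]
            else res)
        res [(-1 : Int), 0, 1] = res := by
    intro res dy hdy
    simp only [List.foldl_cons, List.foldl_nil]
    split_ifs <;> first | rfl | omega
  have outer : ∀ (l : List Int) (res : List (List String)),
      (∀ dy ∈ l, dy = -1 ∨ dy = 0 ∨ dy = 1) →
      List.foldl
        (fun res dy =>
          List.foldl
            (fun res dx =>
              if dx = 0 ∧ dy = 0 then res
              else
                let cx := x + dx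
                let cy := y + dy
                if 97 ≤ cx ∧ cx ≤ 99 ∧ 1 ≤ cy ∧ cy ≤ 3 ∧
                    (dx = 0 ∨ dy = 0 ∨ PySem.Int.mod (cx + cy) 2 = 0) then
                  res ++ [[String.ofList [Char.ofNat cx.toNat], PySem.Int.toStr cy]]
                else res)
            res [(-1 : Int), 0, 1])
        res l = res := by
    intro l
    induction l with
    | nil => intro res _; rfl
    | cons d t ih =>
      intro res hmem
      rw [List.foldl_cons]
      calc _ = List.foldl _ res t := by rw [inner res d (hmem d (by simp))]
        _ = res := ih res (fun z hz => hmem z (by simp [hz]))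
  exact outer [-1, 0, 1] [] (by norm_num)

-- the two cores agree on every pair of extracted coordinates
lemma adjScanA_eq_adjLoopB (x y : Int) : adjScanA x y = adjLoopB x y := by
  by_cases hx : 96 ≤ x ∧ x ≤ 100
  · by_cases hy : 0 ≤ y ∧ y ≤ 4
    · obtain ⟨hx1, hx2⟩ := hx
      obtain ⟨hy1, hy2⟩ := hy
      interval_cases x <;> interval_cases y <;> decide
    · rw [adjScanA_far x y (Or.inr hy), adjLoopB_far x y (Or.inr hy)]
  · rw [adjScanA_far x y (Or.inl hx), adjLoopB_far x y (Or.inl hx)]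

-- ===== VERDICT (by name: the statement is the Claim_ definition above) =====
theorem obter_posicoes_adjacentes_spec : Claim_equal_obter_posicoes_adjacentes := by
  intro p _ _
  unfold Spec_obter_posicoes_adjacentes obter_posicoes_adjacentes obter_posicoes_adjacentes_alt
    obter_pos_c obter_pos_l ordArgA ordArgB
  cases h0 : PySem.List.pyGet? p 0 with
  | none => rfl
  | some pc =>
    simp only [Option.bind_some]
    cases hc : pc.toList with
    | nil => rfl
    | cons c rest =>
      cases rest with
      | cons d t => rfl
      | nil =>
        cases h1 : PySem.List.pyGet? p 1 with
        | none => rfl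
        | some pl =>
          simp only [Option.bind_some]
          cases hy : PySem.Int.ofStr? pl with
          | none => rfl
          | some y =>
            simp only [Option.map_some, Option.getD_some]
            exact adjScanA_eq_adjLoopB _ y
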